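-- pv_equiv track=rewrite | github.com/Antares5/WeDLM-PostTraining | posttraining/wedlm_train/reward/deepmath.py | _strip_enclosing_math_fences
-- ===== SOURCE A (Python) =====
-- def _strip_enclosing_math_fences(text: str) -> str:
--     value = text.strip()
--     pairs = [("$$", "$$"), ("$", "$"), ("\\[", "\\]"), ("\\(", "\\)")]
--
--     changed = True
--     while changed:
--         changed = False
--         for left, right in pairs:
--             if value.startswith(left) and value.endswith(right):
--                 inner = value[len(left): len(value) - len(right)].strip()
--                 if inner:
--                     value = inner
--                     changed = True
--
--     return value
-- ===== SOURCE B (Python) =====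
-- def _strip_enclosing_math_fences(text: str) -> str:
--     # Index-based peeler: never rebuilds intermediate strings, just moves two
--     # pointers (lo, hi) over the original text and slices once at the end.
--     s = text
--     lo, hi = 0, len(s)
--     while lo < hi and s[lo].isspace():
--         lo += 1
--     while lo < hi and s[hi - 1].isspace():
--         hi -= 1
--     pairs = (("$$", "$$"), ("$", "$"), ("\\[", "\\]"), ("\\(", "\\)"))
--     while True:
--         for left, right in pairs:
--             ll, rl = len(left), len(right)
--             if hi - lo >= ll and hi - lo >= rl and s[lo:lo + ll] == left and s[hi - rl:hi] == right:
--                 nlo, nhi = lo + ll, hi - rl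
--                 while nlo < nhi and s[nlo].isspace():
--                     nlo += 1
--                 while nlo < nhi and s[nhi - 1].isspace():
--                     nhi -= 1
--                 if nlo < nhi:
--                     lo, hi = nlo, nhi
--                     break
--         else:
--             return s[lo:hi]
-- ===== Notes on version B (the rewrite author's own statement) =====
-- stated objective: alternative
-- what changed: Replaces the restart-until-unchanged pass loop that rebuilds a freshly stripped string for every peeled delimiter layer with a two-pointer peeler that only moves (lo,hi) indices over the original text and slices once at the end.
import Mathlib
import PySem

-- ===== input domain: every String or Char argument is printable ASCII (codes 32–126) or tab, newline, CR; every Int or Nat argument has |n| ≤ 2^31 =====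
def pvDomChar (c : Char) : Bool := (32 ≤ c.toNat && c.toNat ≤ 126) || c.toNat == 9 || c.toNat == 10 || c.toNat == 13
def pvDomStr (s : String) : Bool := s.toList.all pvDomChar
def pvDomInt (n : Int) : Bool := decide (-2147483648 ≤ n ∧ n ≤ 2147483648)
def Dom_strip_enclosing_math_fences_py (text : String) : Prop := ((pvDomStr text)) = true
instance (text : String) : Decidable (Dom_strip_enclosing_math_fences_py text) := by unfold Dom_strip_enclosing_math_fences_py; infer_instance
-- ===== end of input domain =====

-- B replaces A's restart-until-unchanged pass loop (which rebuilds a freshly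
-- stripped string per peeled layer) with a two-pointer index peeler that slices once
-- at the end; objective: alternative (index arithmetic instead of string rebuilding).

-- ===== PORT A =====
-- pairs = [("$$","$$"), ("$","$"), ("\[","\]"), ("\(","\)")]
def pvPairsA : List (List Char × List Char) :=
  [(['$','$'], ['$','$']), (['$'], ['$']), (['\\','['], ['\\',']']), (['\\','('], ['\\',')'])]

-- the body of A's `for left, right in pairs` loop, acting on the state (value, changed)
def pvStepA (st : List Char × Bool) (p : List Char × List Char) : List Char × Bool :=
  if PySem.Chars.startswith st.1 p.1 && PySem.Chars.endswith st.1 p.2 then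
    let inner := PySem.Chars.strip (PySem.List.slice st.1 (some (p.1.length : Int))
                    (some ((st.1.length : Int) - (p.2.length : Int))))
    if inner.isEmpty then st else (inner, true)
  else st

-- one full pass of the for loop, starting with changed = False
def pvPassA (v : List Char) : List Char × Bool := pvPairsA.foldl pvStepA (v, false)

-- termination of the while loop: a pass that set `changed` strictly shrank the value
theorem pvStrip_length_le (v : List Char) : (PySem.Chars.strip v).length ≤ v.length := by
  unfold PySem.Chars.strip PySem.Chars.rstrip PySem.Chars.lstrip
  have a := List.length_dropWhile_le (p := PySem.Chars.isspace)
      (l := (List.dropWhile PySem.Chars.isspace v).reverse)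
  have b := List.length_dropWhile_le (p := PySem.Chars.isspace) (l := v)
  simp only [List.length_reverse] at a ⊢
  omega

theorem pvStripSlice_lt (v l r : List Char) (hl : l ≠ [])
    (hsw : PySem.Chars.startswith v l = true) (hew : PySem.Chars.endswith v r = true) :
    (PySem.Chars.strip (PySem.List.slice v (some (l.length : Int))
        (some ((v.length : Int) - (r.length : Int))))).length < v.length := by
  have h1 : l.length ≤ v.length := ((PySem.Chars.startswith_iff ..).1 hsw).length_le
  have h2 : r.length ≤ v.length := ((PySem.Chars.endswith_iff ..).1 hew).length_le
  have h0 : 1 ≤ l.length := by cases l with | nil => exact absurd rfl hl | cons a t => simp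
  have hb : ((v.length : Int) - (r.length : Int)) = (((v.length - r.length : Nat) : Int)) := by omega
  rw [hb, PySem.List.slice_natCast]
  calc (PySem.Chars.strip ((v.drop l.length).take (v.length - r.length - l.length))).length
      ≤ ((v.drop l.length).take (v.length - r.length - l.length)).length := pvStrip_length_le _
    _ < v.length := by simp [List.length_take, List.length_drop]; omega

theorem pvStepA_shrink (st : List Char × Bool) (p : List Char × List Char)
    (hp : p.1 ≠ []) (n : Nat) (h1 : st.1.length ≤ n) (h2 : st.2 = true → st.1.length < n) :
    (pvStepA st p).1.length ≤ n ∧ ((pvStepA st p).2 = true → (pvStepA st p).1.length < n) := by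
  unfold pvStepA
  dsimp only
  split
  · next hg =>
    simp only [Bool.and_eq_true] at hg
    have := pvStripSlice_lt st.1 p.1 p.2 hp hg.1 hg.2
    split
    · exact ⟨h1, h2⟩
    · constructor
      · simpa using le_trans (le_of_lt this) h1
      · intro _; simpa using lt_of_lt_of_le this h1
  · exact ⟨h1, h2⟩

theorem pvFoldA_shrink (ps : List (List Char × List Char)) (hps : ∀ p ∈ ps, p.1 ≠ [])
    (st : List Char × Bool) (n : Nat) (h1 : st.1.length ≤ n) (h2 : st.2 = true → st.1.length < n) :
    (ps.foldl pvStepA st).1.length ≤ n ∧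
      ((ps.foldl pvStepA st).2 = true → (ps.foldl pvStepA st).1.length < n) := by
  induction ps generalizing st with
  | nil => exact ⟨h1, h2⟩
  | cons p ps ih =>
    have hstep := pvStepA_shrink st p (hps p (by simp)) n h1 h2
    exact ih (fun q hq => hps q (by simp [hq])) (pvStepA st p) hstep.1 hstep.2

theorem pvPassA_shrink (v : List Char) :
    (pvPassA v).1.length ≤ v.length ∧ ((pvPassA v).2 = true → (pvPassA v).1.length < v.length) := by
  exact pvFoldA_shrink pvPairsA (by decide) (v, false) v.length (le_refl _) (by simp)

-- `while changed:` — repeat the pass until nothing changed, then return the value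
def pvLoopA (v : List Char) : List Char :=
  if h : (pvPassA v).2 = true then pvLoopA (pvPassA v).1 else (pvPassA v).1
  termination_by v.length
  decreasing_by exact (pvPassA_shrink v).2 h

def strip_enclosing_math_fences_py (text : String) : String :=
  String.ofList (pvLoopA (PySem.Chars.strip text.toList))

-- ===== PORT B =====
def pvPairsB : List (List Char × List Char) :=
  [(['$','$'], ['$','$']), (['$'], ['$']), (['\\','['], ['\\',']']), (['\\','('], ['\\',')'])]

-- `while lo < hi and s[lo].isspace(): lo += 1`  (in-range indexing ported with getD)
def pvSkipL (s : List Char) (lo hi : Nat) : Nat :=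
  if h : lo < hi ∧ PySem.Chars.isspace (s.getD lo ' ') = true then pvSkipL s (lo + 1) hi else lo
  termination_by hi - lo
  decreasing_by omega

-- `while lo < hi and s[hi-1].isspace(): hi -= 1`
def pvSkipR (s : List Char) (lo hi : Nat) : Nat :=
  if h : lo < hi ∧ PySem.Chars.isspace (s.getD (hi - 1) ' ') = true then pvSkipR s lo (hi - 1) else hi
  termination_by hi - lo
  decreasing_by omega

theorem pvSkipL_bounds (s : List Char) (lo hi : Nat) :
    lo ≤ pvSkipL s lo hi ∧ (lo ≤ hi → pvSkipL s lo hi ≤ hi) := by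
  fun_induction pvSkipL s lo hi <;> omega

theorem pvSkipR_bounds (s : List Char) (lo hi : Nat) :
    pvSkipR s lo hi ≤ hi ∧ (lo ≤ hi → lo ≤ pvSkipR s lo hi) := by
  fun_induction pvSkipR s lo hi <;> omega

-- the `for left, right in pairs` loop: first pair that peels a nonempty interior
def pvFindPeel (s : List Char) (lo hi : Nat) : List (List Char × List Char) → Option (Nat × Nat)
  | [] => none
  | p :: ps =>
    if hi - lo ≥ p.1.length ∧ hi - lo ≥ p.2.length ∧
        (s.drop lo).take p.1.length = p.1 ∧ (s.drop (hi - p.2.length)).take p.2.length = p.2 then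
      let nlo := pvSkipL s (lo + p.1.length) (hi - p.2.length)
      let nhi := pvSkipR s nlo (hi - p.2.length)
      if nlo < nhi then some (nlo, nhi) else pvFindPeel s lo hi ps
    else pvFindPeel s lo hi ps

theorem pvFindPeel_lt (s : List Char) (lo hi : Nat) (ps : List (List Char × List Char))
    (hps : ∀ p ∈ ps, 1 ≤ p.1.length) (a b : Nat) (h : pvFindPeel s lo hi ps = some (a, b)) :
    b - a < hi - lo := by
  induction ps with
  | nil => simp [pvFindPeel] at h
  | cons p ps ih =>
    rw [pvFindPeel] at h
    by_cases hg : hi - lo ≥ p.1.length ∧ hi - lo ≥ p.2.length ∧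
        (s.drop lo).take p.1.length = p.1 ∧ (s.drop (hi - p.2.length)).take p.2.length = p.2
    · simp only [if_pos hg] at h
      have hl1 : 1 ≤ p.1.length := hps p (by simp)
      by_cases hn : pvSkipL s (lo + p.1.length) (hi - p.2.length) <
          pvSkipR s (pvSkipL s (lo + p.1.length) (hi - p.2.length)) (hi - p.2.length)
      · simp only [if_pos hn, Option.some.injEq, Prod.mk.injEq] at h
        have b1 := (pvSkipL_bounds s (lo + p.1.length) (hi - p.2.length)).1
        have b2 := (pvSkipR_bounds s (pvSkipL s (lo + p.1.length) (hi - p.2.length)) (hi - p.2.length)).1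
        omega
      · simp only [if_neg hn] at h
        exact ih (fun q hq => hps q (by simp [hq])) h
    · simp only [if_neg hg] at h
      exact ih (fun q hq => hps q (by simp [hq])) h

-- `while True:` — peel while some pair applies, then slice once
def pvLoopB (s : List Char) (lo hi : Nat) : List Char :=
  match h : pvFindPeel s lo hi pvPairsB with
  | some (a, b) => pvLoopB s a b
  | none => (s.drop lo).take (hi - lo)
  termination_by hi - lo
  decreasing_by exact pvFindPeel_lt s lo hi pvPairsB (by decide) a b h

def strip_enclosing_math_fences_py_alt (text : String) : String :=
  let s := text.toList
  let lo := pvSkipL s 0 s.length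
  let hi := pvSkipR s lo s.length
  String.ofList (pvLoopB s lo hi)

-- ===== PRECONDITION & SPEC =====
def Spec_strip_enclosing_math_fences_py (text : String) (out : String) : Prop := out = strip_enclosing_math_fences_py_alt text
instance (text : String) (out : String) : Decidable (Spec_strip_enclosing_math_fences_py text out) := by unfold Spec_strip_enclosing_math_fences_py; infer_instance

-- ===== CLAIM (what is proved, stated in full; the proofs are below) =====
def Claim_equal_strip_enclosing_math_fences_py : Prop := ∀ (text : String), Dom_strip_enclosing_math_fences_py text → Spec_strip_enclosing_math_fences_py text (strip_enclosing_math_fences_py text)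

-- ===== LEMMAS AND PROOFS =====

-- The common mathematical form both ports are reduced to: a first-match peeler
-- over the pair list, working on plain (already materialised) char lists.
def pvInner (p : List Char × List Char) (v : List Char) : List Char :=
  PySem.Chars.strip ((v.drop p.1.length).take (v.length - p.2.length - p.1.length))

def pvPk (p : List Char × List Char) (v : List Char) : Bool :=
  PySem.Chars.startswith v p.1 && PySem.Chars.endswith v p.2 && !(pvInner p v).isEmpty

def pvTryC (v : List Char) : List (List Char × List Char) → Option (List Char)
  | [] => none
  | p :: ps => if pvPk p v then some (pvInner p v) else pvTryC v ps

theorem pvInner_lt (p : List Char × List Char) (v : List Char)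
    (hp : p.1 ≠ []) (hs : PySem.Chars.startswith v p.1 = true) :
    (pvInner p v).length < v.length := by
  have h1 : p.1.length ≤ v.length := ((PySem.Chars.startswith_iff ..).1 hs).length_le
  have h0 : 1 ≤ p.1.length := by cases hq : p.1 with | nil => exact absurd hq hp | cons a t => simp
  have h2 := pvStrip_length_le ((v.drop p.1.length).take (v.length - p.2.length - p.1.length))
  unfold pvInner
  simp [List.length_take, List.length_drop] at h2 ⊢
  omega

theorem pvTryC_lt (v : List Char) (ps : List (List Char × List Char))
    (hps : ∀ p ∈ ps, p.1 ≠ []) (i : List Char) (h : pvTryC v ps = some i) :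
    i.length < v.length := by
  induction ps with
  | nil => simp [pvTryC] at h
  | cons p ps ih =>
    rw [pvTryC] at h
    by_cases hk : pvPk p v = true
    · simp only [if_pos hk, Option.some.injEq] at h
      have hsw : PySem.Chars.startswith v p.1 = true := by
        unfold pvPk at hk; simp only [Bool.and_eq_true] at hk; exact hk.1.1
      exact h ▸ pvInner_lt p v (hps p (by simp)) hsw
    · simp only [if_neg hk] at h
      exact ih (fun q hq => hps q (by simp [hq])) h

def pvCanon (v : List Char) : List Char :=
  match h : pvTryC v pvPairsA with
  | some i => pvCanon i
  | none => v
  termination_by v.length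
  decreasing_by exact pvTryC_lt v pvPairsA (by decide) i h

theorem pvCanon_none (v : List Char) (h : pvTryC v pvPairsA = none) : pvCanon v = v := by
  rw [pvCanon]; split <;> simp_all

theorem pvCanon_some (v i : List Char) (h : pvTryC v pvPairsA = some i) :
    pvCanon v = pvCanon i := by
  rw [pvCanon]; split <;> simp_all

-- ---- basic strip facts ----
theorem pvLstrip_cons (c : Char) (t : List Char) :
    PySem.Chars.lstrip (c :: t) = if PySem.Chars.isspace c then PySem.Chars.lstrip t else c :: t := by
  unfold PySem.Chars.lstrip
  rw [List.dropWhile_cons]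

theorem pvRstrip_append (xs : List Char) (c : Char) :
    PySem.Chars.rstrip (xs ++ [c]) = if PySem.Chars.isspace c then PySem.Chars.rstrip xs else xs ++ [c] := by
  unfold PySem.Chars.rstrip
  rw [List.reverse_append, List.reverse_singleton, List.singleton_append, List.dropWhile_cons]
  split <;> simp

theorem pvStrip_of_ends (a b : Char) (mid : List Char)
    (ha : PySem.Chars.isspace a = false) (hb : PySem.Chars.isspace b = false) :
    PySem.Chars.strip (a :: mid ++ [b]) = a :: mid ++ [b] := by
  unfold PySem.Chars.strip
  have e1 : (a :: mid ++ [b] : List Char) = a :: (mid ++ [b]) := by simp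
  have e2 : (a :: mid ++ [b] : List Char) = (a :: mid) ++ [b] := by simp
  rw [e1, pvLstrip_cons, if_neg (by simp [ha]), ← e1, e2, pvRstrip_append,
    if_neg (by simp [hb]), ← e2]

-- ---- A-side: the pass loop computes the first-match peeler ----
theorem pvStepA_eq (v : List Char) (c : Bool) (p : List Char × List Char) :
    pvStepA (v, c) p = if pvPk p v then (pvInner p v, true) else (v, c) := by
  unfold pvStepA pvPk
  dsimp only
  by_cases hsw : PySem.Chars.startswith v p.1 = true
  · by_cases hew : PySem.Chars.endswith v p.2 = true
    · have hr : p.2.length ≤ v.length := ((PySem.Chars.endswith_iff ..).1 hew).length_le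
      have hb : ((v.length : Int) - (p.2.length : Int)) = (((v.length - p.2.length : Nat) : Int)) := by
        omega
      rw [if_pos (by simp [hsw, hew]), hb, PySem.List.slice_natCast]
      have : PySem.Chars.strip ((v.drop p.1.length).take (v.length - p.2.length - p.1.length)) =
          pvInner p v := rfl
      rw [this]
      by_cases he : (pvInner p v).isEmpty
      · rw [if_pos he, if_neg (by simp [hsw, hew, he])]
      · rw [if_neg he, if_pos (by simp [hsw, hew]; simpa using he)]
    · rw [if_neg (by simp [hew]), if_neg (by simp [hew])]
  · rw [if_neg (by simp [hsw]), if_neg (by simp [hsw])]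

theorem pvStrip_nil : PySem.Chars.strip [] = [] := by
  simp [PySem.Chars.strip, PySem.Chars.lstrip, PySem.Chars.rstrip]

theorem pvPk_parts (p : List Char × List Char) (v : List Char) (h : pvPk p v = true) :
    PySem.Chars.startswith v p.1 = true ∧ PySem.Chars.endswith v p.2 = true ∧ pvInner p v ≠ [] := by
  unfold pvPk at h
  simp only [Bool.and_eq_true, Bool.not_eq_true'] at h
  refine ⟨h.1.1, h.1.2, fun hnil => ?_⟩
  rw [hnil] at h
  simp at h

theorem pvTryC_pairs (v : List Char) :
    pvTryC v pvPairsA =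
      (if pvPk (['$','$'], ['$','$']) v then some (pvInner (['$','$'], ['$','$']) v)
       else if pvPk (['$'], ['$']) v then some (pvInner (['$'], ['$']) v)
       else if pvPk (['\\','['], ['\\',']']) v then some (pvInner (['\\','['], ['\\',']']) v)
       else if pvPk (['\\','('], ['\\',')']) v then some (pvInner (['\\','('], ['\\',')']) v)
       else none) := by
  rfl

theorem pvAbsorb (p : List Char × List Char) (hp : p ∈ pvPairsA) (v : List Char)
    (h : pvPk p v = true) : pvCanon (pvInner p v) = pvCanon v := by
  have main : ∀ N (v : List Char) (p : List Char × List Char), p ∈ pvPairsA →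
      v.length ≤ N → pvPk p v = true → pvCanon (pvInner p v) = pvCanon v := by
    intro N
    induction N with
    | zero =>
      intro v p hp hlen hkk
      have hv : v = [] := by cases v with | nil => rfl | cons a t => simp at hlen
      subst hv
      simp only [pvPairsA, List.mem_cons, List.not_mem_nil, or_false] at hp
      rcases hp with rfl | rfl | rfl | rfl <;> exact absurd hkk (by decide)
    | succ N ih =>
      intro v p hp hlen hkk
      simp only [pvPairsA, List.mem_cons, List.not_mem_nil, or_false] at hp
      obtain ⟨hsw, hew, hne⟩ := pvPk_parts p v hkk
      rcases hp with rfl | rfl | rfl | rfl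
      · -- "$$" is the first pair: definitional
        exact (pvCanon_some v _ (by rw [pvTryC_pairs, if_pos hkk])).symm
      · -- "$": the only pair an earlier pair ("$$") can also match
        by_cases hk0 : pvPk (['$','$'], ['$','$']) v = true
        · obtain ⟨hsw0, hew0, hne0⟩ := pvPk_parts _ v hk0
          obtain ⟨t, ht⟩ := (PySem.Chars.startswith_iff ..).1 hsw0
          obtain ⟨u, hu⟩ := (PySem.Chars.endswith_iff ..).1 hew0
          -- v.length ≥ 5, else the "$$"-interior strips to nothing
          have hn5 : 5 ≤ v.length := by
            by_contra hn
            apply hne0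
            unfold pvInner
            rw [show v.length - (['$','$'] : List Char).length - (['$','$'] : List Char).length = 0
              from by simp; omega]
            simp [pvStrip_nil]
          have hul : u.length = v.length - 2 := by
            have := congrArg List.length hu; simp at this; omega
          have hut : u ++ ['$','$'] = '$' :: '$' :: t := by
            rw [hu, ← ht]; rfl
          obtain ⟨mid, hmid⟩ : ∃ mid, u = '$' :: '$' :: mid := by
            cases u with
            | nil => simp at hul; omega
            | cons a u1 =>
              cases u1 with
              | nil => simp at hul; omega
              | cons b u2 =>
                simp only [List.cons_append, List.cons.injEq] at hut
                exact ⟨u2, by rw [hut.1, hut.2.1]⟩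
          have hv : v = '$' :: '$' :: (mid ++ ['$','$']) := by
            rw [← hu, hmid]; rfl
          subst hv
          -- the "$$"-interior is (strip mid)
          have inner2 : pvInner (['$','$'], ['$','$']) ('$' :: '$' :: (mid ++ ['$','$']))
              = PySem.Chars.strip mid := by
            unfold pvInner
            have e2 : ('$' :: '$' :: (mid ++ ['$','$'])).length - (['$','$'] : List Char).length
                - (['$','$'] : List Char).length = mid.length := by simp
            rw [e2]
            have e1 : ('$' :: '$' :: (mid ++ ['$','$'])).drop (['$','$'] : List Char).length
                = mid ++ ['$','$'] := rfl
            rw [e1, List.take_left]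
          -- the "$"-interior is "$" ++ mid ++ "$", already stripped
          have inner1 : pvInner (['$'], ['$']) ('$' :: '$' :: (mid ++ ['$','$']))
              = '$' :: mid ++ ['$'] := by
            unfold pvInner
            have e2 : ('$' :: '$' :: (mid ++ ['$','$'])).length - (['$'] : List Char).length
                - (['$'] : List Char).length = mid.length + 2 := by simp
            rw [e2]
            have e1 : ('$' :: '$' :: (mid ++ ['$','$'])).drop (['$'] : List Char).length
                = '$' :: (mid ++ ['$','$']) := rfl
            rw [e1, List.take_succ_cons, show mid.length + 1 = mid.length + 1 from rfl]
            have e3 : (mid ++ ['$','$']).take (mid.length + 1) = mid ++ ['$'] := by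
              rw [List.take_length_add_append 1]
              rfl
            rw [e3]
            exact pvStrip_of_ends '$' '$' mid (by decide) (by decide)
          have hmidne : PySem.Chars.strip mid ≠ [] := by rw [← inner2]; exact hne0
          -- the "$"-peel of W := "$" ++ mid ++ "$" is also (strip mid)
          have c3 : pvInner (['$'], ['$']) ('$' :: mid ++ ['$']) = PySem.Chars.strip mid := by
            unfold pvInner
            have e2 : ('$' :: mid ++ ['$']).length - (['$'] : List Char).length
                - (['$'] : List Char).length = mid.length := by simp
            rw [e2]
            have e1 : ('$' :: mid ++ ['$']).drop (['$'] : List Char).length = mid ++ ['$'] := rfl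
            rw [e1, List.take_left]
          have hkW : pvPk (['$'], ['$']) ('$' :: mid ++ ['$']) = true := by
            have c1 : PySem.Chars.startswith ('$' :: mid ++ ['$']) ['$'] = true :=
              (PySem.Chars.startswith_iff ..).2 ⟨mid ++ ['$'], rfl⟩
            have c2 : PySem.Chars.endswith ('$' :: mid ++ ['$']) ['$'] = true :=
              (PySem.Chars.endswith_iff ..).2 (List.suffix_append ('$' :: mid) ['$'])
            unfold pvPk
            rw [c1, c2, c3]
            simpa [List.isEmpty_iff] using hmidne
          have hW := ih ('$' :: mid ++ ['$']) (['$'], ['$']) (by decide)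
            (by simp at hlen ⊢; omega) hkW
          rw [c3] at hW
          rw [inner1, pvCanon_some ('$' :: '$' :: (mid ++ ['$','$'])) _ (by rw [pvTryC_pairs, if_pos hk0]), inner2, hW]
        · exact (pvCanon_some v _ (by rw [pvTryC_pairs, if_neg (by simp [hk0]), if_pos hkk])).symm
      · -- "\[": no earlier pair can match a string starting with a backslash
        obtain ⟨t, ht⟩ := (PySem.Chars.startswith_iff ..).1 hsw
        have hv : v = '\\' :: '[' :: t := by simpa using ht.symm
        have h0 : pvPk (['$','$'], ['$','$']) v = false := by
          unfold pvPk
          rcases Bool.eq_false_or_eq_true (PySem.Chars.startswith v ['$','$']) with h1 | h1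
          · rw [PySem.Chars.startswith_iff, hv, List.cons_prefix_cons] at h1
            exact absurd h1.1 (by decide)
          · rw [h1]; simp
        have h1 : pvPk (['$'], ['$']) v = false := by
          unfold pvPk
          rcases Bool.eq_false_or_eq_true (PySem.Chars.startswith v ['$']) with h1 | h1
          · rw [PySem.Chars.startswith_iff, hv, List.cons_prefix_cons] at h1
            exact absurd h1.1 (by decide)
          · rw [h1]; simp
        exact (pvCanon_some v _ (by
          rw [pvTryC_pairs, if_neg (by simp [h0]), if_neg (by simp [h1]), if_pos hkk])).symm
      · -- "\(": same, and "\[" fails on the second character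
        obtain ⟨t, ht⟩ := (PySem.Chars.startswith_iff ..).1 hsw
        have hv : v = '\\' :: '(' :: t := by simpa using ht.symm
        have h0 : pvPk (['$','$'], ['$','$']) v = false := by
          unfold pvPk
          rcases Bool.eq_false_or_eq_true (PySem.Chars.startswith v ['$','$']) with h1 | h1
          · rw [PySem.Chars.startswith_iff, hv, List.cons_prefix_cons] at h1
            exact absurd h1.1 (by decide)
          · rw [h1]; simp
        have h1 : pvPk (['$'], ['$']) v = false := by
          unfold pvPk
          rcases Bool.eq_false_or_eq_true (PySem.Chars.startswith v ['$']) with h1 | h1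
          · rw [PySem.Chars.startswith_iff, hv, List.cons_prefix_cons] at h1
            exact absurd h1.1 (by decide)
          · rw [h1]; simp
        have h2 : pvPk (['\\','['], ['\\',']']) v = false := by
          unfold pvPk
          rcases Bool.eq_false_or_eq_true (PySem.Chars.startswith v ['\\','[']) with h1 | h1
          · rw [PySem.Chars.startswith_iff, hv, List.cons_prefix_cons, List.cons_prefix_cons] at h1
            exact absurd h1.2.1 (by decide)
          · rw [h1]; simp
        exact (pvCanon_some v _ (by
          rw [pvTryC_pairs, if_neg (by simp [h0]), if_neg (by simp [h1]),
            if_neg (by simp [h2]), if_pos hkk])).symm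
  exact main v.length v p hp (le_refl _) h

theorem pvFoldA_none (v : List Char) (c : Bool) (ps : List (List Char × List Char))
    (h : pvTryC v ps = none) : ps.foldl pvStepA (v, c) = (v, c) := by
  induction ps generalizing c with
  | nil => rfl
  | cons p ps ih =>
    rw [pvTryC] at h
    by_cases hk : pvPk p v = true
    · simp [if_pos hk] at h
    · simp only [if_neg hk] at h
      rw [List.foldl_cons, pvStepA_eq, if_neg hk]
      exact ih c h

theorem pvFoldA_tail (ps : List (List Char × List Char)) (hps : ∀ p ∈ ps, p ∈ pvPairsA)
    (u : List Char) :
    (ps.foldl pvStepA (u, true)).2 = true ∧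
    pvCanon (ps.foldl pvStepA (u, true)).1 = pvCanon u ∧
    (ps.foldl pvStepA (u, true)).1.length ≤ u.length := by
  induction ps generalizing u with
  | nil => exact ⟨rfl, rfl, le_refl _⟩
  | cons p ps ih =>
    have hsub : ∀ q ∈ ps, q ∈ pvPairsA := fun q hq => hps q (by simp [hq])
    rw [List.foldl_cons, pvStepA_eq]
    by_cases hk : pvPk p u = true
    · rw [if_pos hk]
      obtain ⟨c1, c2, c3⟩ := ih hsub (pvInner p u)
      have hne : p.1 ≠ [] := by
        have : ∀ q ∈ pvPairsA, q.1 ≠ [] := by decide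
        exact this p (hps p (by simp))
      have hsw : PySem.Chars.startswith u p.1 = true := by
        unfold pvPk at hk; simp only [Bool.and_eq_true] at hk; exact hk.1.1
      refine ⟨c1, ?_, ?_⟩
      · rw [c2, pvAbsorb p (hps p (by simp)) u hk]
      · exact le_trans c3 (le_of_lt (pvInner_lt p u hne hsw))
    · rw [if_neg hk]
      exact ih hsub u

theorem pvFoldA_some (ps : List (List Char × List Char)) (hps : ∀ p ∈ ps, p ∈ pvPairsA)
    (v : List Char) (i : List Char) (h : pvTryC v ps = some i) :
    (ps.foldl pvStepA (v, false)).2 = true ∧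
    pvCanon (ps.foldl pvStepA (v, false)).1 = pvCanon i ∧
    (ps.foldl pvStepA (v, false)).1.length ≤ i.length := by
  induction ps with
  | nil => simp [pvTryC] at h
  | cons p ps ih =>
    have hsub : ∀ q ∈ ps, q ∈ pvPairsA := fun q hq => hps q (by simp [hq])
    rw [pvTryC] at h
    rw [List.foldl_cons, pvStepA_eq]
    by_cases hk : pvPk p v = true
    · simp only [if_pos hk, Option.some.injEq] at h
      rw [if_pos hk, ← h]
      exact pvFoldA_tail ps hsub (pvInner p v)
    · simp only [if_neg hk] at h
      rw [if_neg hk]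
      exact ih hsub h

theorem pvLoopA_eq_canon (v : List Char) : pvLoopA v = pvCanon v := by
  have main : ∀ n v, v.length ≤ n → pvLoopA v = pvCanon v := by
    intro n
    induction n with
    | zero =>
      intro v hv
      have hv0 : v = [] := by cases v with | nil => rfl | cons a t => simp at hv
      subst hv0
      have htry : pvTryC [] pvPairsA = none := by decide
      have hp : pvPassA [] = ([], false) := pvFoldA_none [] false pvPairsA htry
      rw [pvLoopA, pvCanon_none [] htry]
      simp [hp]
    | succ n ih =>
      intro v hv
      cases htry : pvTryC v pvPairsA with
      | none =>
        have hp : pvPassA v = (v, false) := pvFoldA_none v false pvPairsA htry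
        rw [pvLoopA, pvCanon_none v htry]
        simp [hp]
      | some i =>
        obtain ⟨c1, c2, c3⟩ := pvFoldA_some pvPairsA (fun p hp => hp) v i htry
        have e : pvPairsA.foldl pvStepA (v, false) = pvPassA v := rfl
        rw [e] at c1 c2 c3
        have hlt : i.length < v.length := pvTryC_lt v pvPairsA (by decide) i htry
        rw [pvLoopA, dif_pos c1, pvCanon_some v i htry, ← c2]
        exact ih (pvPassA v).1 (by omega)
  exact main v.length v (le_refl _)

-- ---- B-side: the index loops compute the same peeler on the segment ----
theorem pvSkipL_spec (s : List Char) (lo hi : Nat) (hab : lo ≤ hi) (hhs : hi ≤ s.length) :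
    PySem.Chars.lstrip ((s.drop lo).take (hi - lo)) =
      (s.drop (pvSkipL s lo hi)).take (hi - pvSkipL s lo hi) := by
  revert hab
  fun_induction pvSkipL s lo hi with
  | case1 lo h ih =>
    intro hab
    have hlt : lo < s.length := by omega
    have hseg : (s.drop lo).take (hi - lo) = s[lo] :: (s.drop (lo + 1)).take (hi - (lo + 1)) := by
      rw [List.drop_eq_getElem_cons hlt, show hi - lo = (hi - (lo + 1)) + 1 by omega,
        List.take_succ_cons]
    rw [hseg, pvLstrip_cons, if_pos (by rw [← List.getD_eq_getElem s ' ' hlt]; exact h.2)]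
    exact ih (by omega)
  | case2 lo h =>
    intro hab
    rcases Nat.lt_or_ge lo hi with hlt | hge
    · have hlo : lo < s.length := by omega
      have hns : PySem.Chars.isspace (s.getD lo ' ') = false := by
        rcases Bool.eq_false_or_eq_true (PySem.Chars.isspace (s.getD lo ' ')) with h0 | h0
        · exact absurd ⟨hlt, h0⟩ h
        · exact h0
      have hseg : (s.drop lo).take (hi - lo) = s[lo] :: (s.drop (lo + 1)).take (hi - (lo + 1)) := by
        rw [List.drop_eq_getElem_cons hlo, show hi - lo = (hi - (lo + 1)) + 1 by omega,
          List.take_succ_cons]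
      rw [hseg, pvLstrip_cons, if_neg (by rw [← List.getD_eq_getElem s ' ' hlo, hns]; exact Bool.false_ne_true), ← hseg]
    · have : hi - lo = 0 := by omega
      simp [this, PySem.Chars.lstrip]

theorem pvSegSnoc (s : List Char) (lo hi : Nat) (hlt : lo < hi) (hhs : hi ≤ s.length) :
    (s.drop lo).take (hi - lo) = (s.drop lo).take (hi - 1 - lo) ++ [s[hi - 1]'(by omega)] := by
  have h1 : hi - lo = (hi - 1 - lo) + 1 := by omega
  rw [h1, List.take_add_one, List.getElem?_drop]
  have h2 : (lo + (hi - 1 - lo)) = hi - 1 := by omega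
  rw [h2, List.getElem?_eq_getElem (by omega)]
  rfl

theorem pvSkipR_spec (s : List Char) (lo hi : Nat) (hab : lo ≤ hi) (hhs : hi ≤ s.length) :
    PySem.Chars.rstrip ((s.drop lo).take (hi - lo)) =
      (s.drop lo).take (pvSkipR s lo hi - lo) := by
  revert hab hhs
  fun_induction pvSkipR s lo hi with
  | case1 hi h ih =>
    intro hab hhs
    have hlt : hi - 1 < s.length := by omega
    rw [pvSegSnoc s lo hi h.1 hhs, pvRstrip_append,
      if_pos (by rw [← List.getD_eq_getElem s ' ' hlt]; exact h.2)]
    exact ih (by omega) (by omega)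
  | case2 hi h =>
    intro hab hhs
    rcases Nat.lt_or_ge lo hi with hlt | hge
    · have hhi : hi - 1 < s.length := by omega
      have hns : PySem.Chars.isspace (s.getD (hi - 1) ' ') = false := by
        rcases Bool.eq_false_or_eq_true (PySem.Chars.isspace (s.getD (hi - 1) ' ')) with h0 | h0
        · exact absurd ⟨hlt, h0⟩ h
        · exact h0
      rw [pvSegSnoc s lo hi hlt hhs, pvRstrip_append,
        if_neg (by rw [← List.getD_eq_getElem s ' ' hhi, hns]; exact Bool.false_ne_true), ← pvSegSnoc s lo hi hlt hhs]
    · have : hi - lo = 0 := by omega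
      simp [this, PySem.Chars.rstrip]

theorem pvSegDrop (s : List Char) (lo hi m : Nat) :
    ((s.drop lo).take (hi - lo)).drop m = (s.drop (lo + m)).take (hi - lo - m) := by
  rw [List.drop_take, List.drop_drop]

theorem pvFindPeel_spec (ps : List (List Char × List Char)) (s : List Char) (lo hi : Nat)
    (hab : lo ≤ hi) (hhs : hi ≤ s.length) :
    (pvFindPeel s lo hi ps = none ∧ pvTryC ((s.drop lo).take (hi - lo)) ps = none) ∨
    (∃ a b, pvFindPeel s lo hi ps = some (a, b) ∧
      pvTryC ((s.drop lo).take (hi - lo)) ps = some ((s.drop a).take (b - a)) ∧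
      lo ≤ a ∧ a ≤ b ∧ b ≤ hi) := by
  induction ps with
  | nil => exact Or.inl ⟨rfl, rfl⟩
  | cons p ps ih =>
    have hseglen : ((s.drop lo).take (hi - lo)).length = hi - lo := by
      simp [List.length_take, List.length_drop]; omega
    have hsw_iff : PySem.Chars.startswith ((s.drop lo).take (hi - lo)) p.1 = true ↔
        (p.1.length ≤ hi - lo ∧ (s.drop lo).take p.1.length = p.1) := by
      rw [PySem.Chars.startswith_iff, List.prefix_iff_eq_take]
      constructor
      · intro h
        have hlen : p.1.length ≤ hi - lo := by
          have hl := congrArg List.length h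
          simp only [List.length_take, hseglen] at hl
          omega
        rw [List.take_take, min_eq_left hlen] at h
        exact ⟨hlen, h.symm⟩
      · intro ⟨hlen, he⟩
        rw [List.take_take, min_eq_left hlen, he]
    have hew_iff : PySem.Chars.endswith ((s.drop lo).take (hi - lo)) p.2 = true ↔
        (p.2.length ≤ hi - lo ∧ (s.drop (hi - p.2.length)).take p.2.length = p.2) := by
      rw [PySem.Chars.endswith_iff, List.suffix_iff_eq_drop]
      constructor
      · intro h
        have hlen : p.2.length ≤ hi - lo := by
          have hl := congrArg List.length h
          rw [List.length_drop, hseglen] at hl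
          omega
        rw [hseglen, pvSegDrop] at h
        rw [show lo + (hi - lo - p.2.length) = hi - p.2.length by omega,
          show hi - lo - (hi - lo - p.2.length) = p.2.length by omega] at h
        exact ⟨hlen, h.symm⟩
      · intro ⟨hlen, he⟩
        rw [hseglen, pvSegDrop,
          show lo + (hi - lo - p.2.length) = hi - p.2.length by omega,
          show hi - lo - (hi - lo - p.2.length) = p.2.length by omega, he]
    rw [pvFindPeel, pvTryC]
    by_cases hc : hi - lo ≥ p.1.length ∧ hi - lo ≥ p.2.length ∧
        (s.drop lo).take p.1.length = p.1 ∧ (s.drop (hi - p.2.length)).take p.2.length = p.2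
    · obtain ⟨hc1, hc2, hc3, hc4⟩ := hc
      have hsw : PySem.Chars.startswith ((s.drop lo).take (hi - lo)) p.1 = true :=
        hsw_iff.2 ⟨hc1, hc3⟩
      have hew : PySem.Chars.endswith ((s.drop lo).take (hi - lo)) p.2 = true :=
        hew_iff.2 ⟨hc2, hc4⟩
      have hinner : pvInner p ((s.drop lo).take (hi - lo)) =
          PySem.Chars.strip ((s.drop (lo + p.1.length)).take ((hi - p.2.length) - (lo + p.1.length))) := by
        unfold pvInner
        rw [hseglen, pvSegDrop, List.take_take,
          show min (hi - lo - p.2.length - p.1.length) (hi - lo - p.1.length)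
            = (hi - p.2.length) - (lo + p.1.length) by omega]
      rw [if_pos ⟨hc1, hc2, hc3, hc4⟩]
      rcases Nat.lt_or_ge (hi - p.2.length) (lo + p.1.length) with hord | hord
      · -- interior region is empty before stripping
        have hsl : pvSkipL s (lo + p.1.length) (hi - p.2.length) = lo + p.1.length := by
          rw [pvSkipL, dif_neg (by intro hx; omega)]
        have hsr : pvSkipR s (lo + p.1.length) (hi - p.2.length) = hi - p.2.length := by
          rw [pvSkipR, dif_neg (by intro hx; omega)]
        have hempty : pvInner p ((s.drop lo).take (hi - lo)) = [] := by
          rw [hinner, show (hi - p.2.length) - (lo + p.1.length) = 0 by omega]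
          simp [PySem.Chars.strip, PySem.Chars.lstrip, PySem.Chars.rstrip]
        have hpk : pvPk p ((s.drop lo).take (hi - lo)) = false := by
          unfold pvPk
          rw [hempty]
          simp
        rw [hsl, if_neg (by rw [hsr]; omega), hpk, if_neg (by simp)]
        exact ih
      · -- interior region exists; strip it via the two skips
        have hb0 : hi - p.2.length ≤ s.length := by omega
        have hl1 := pvSkipL_spec s (lo + p.1.length) (hi - p.2.length) hord hb0
        have hlb := pvSkipL_bounds s (lo + p.1.length) (hi - p.2.length)
        set nlo := pvSkipL s (lo + p.1.length) (hi - p.2.length) with hnlo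
        have hr1 := pvSkipR_spec s nlo (hi - p.2.length) (hlb.2 hord) hb0
        have hrb := pvSkipR_bounds s nlo (hi - p.2.length)
        set nhi := pvSkipR s nlo (hi - p.2.length) with hnhi
        have hstrip : pvInner p ((s.drop lo).take (hi - lo)) = (s.drop nlo).take (nhi - nlo) := by
          rw [hinner]
          unfold PySem.Chars.strip
          rw [hl1, hr1]
        have hlen2 : ((s.drop nlo).take (nhi - nlo)).length = nhi - nlo := by
          have : nhi ≤ s.length := le_trans hrb.1 hb0
          simp [List.length_take, List.length_drop]; omega
        rcases Nat.lt_or_ge nlo nhi with hlt | hge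
        · -- nonempty interior: both sides peel here
          have hne : ((s.drop nlo).take (nhi - nlo)) ≠ [] := by
            intro h0
            rw [h0] at hlen2
            simp at hlen2
            omega
          have hpk : pvPk p ((s.drop lo).take (hi - lo)) = true := by
            unfold pvPk
            rw [hsw, hew, hstrip]
            simpa [List.isEmpty_iff] using hne
          rw [if_pos hlt, hpk, if_pos rfl, hstrip]
          exact Or.inr ⟨nlo, nhi, rfl, rfl, by omega, by omega, by omega⟩
        · -- interior strips to empty: both sides skip this pair
          have hempty : pvInner p ((s.drop lo).take (hi - lo)) = [] := by
            rw [hstrip, show nhi - nlo = 0 by omega]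
            simp
          have hpk : pvPk p ((s.drop lo).take (hi - lo)) = false := by
            unfold pvPk
            rw [hempty]
            simp
          rw [if_neg (by omega), hpk, if_neg (by simp)]
          exact ih
    · have hpk : pvPk p ((s.drop lo).take (hi - lo)) = false := by
        unfold pvPk
        rcases Bool.eq_false_or_eq_true (PySem.Chars.startswith ((s.drop lo).take (hi - lo)) p.1) with h0 | h0
        · rcases Bool.eq_false_or_eq_true (PySem.Chars.endswith ((s.drop lo).take (hi - lo)) p.2) with h1 | h1
          · exact absurd ⟨(hsw_iff.1 h0).1, (hew_iff.1 h1).1, (hsw_iff.1 h0).2, (hew_iff.1 h1).2⟩ hc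
          · rw [h1]; simp
        · rw [h0]; simp
      rw [if_neg hc, hpk, if_neg (by simp)]
      exact ih

theorem pvLoopB_eq_canon (s : List Char) (lo hi : Nat) (hab : lo ≤ hi) (hhs : hi ≤ s.length) :
    pvLoopB s lo hi = pvCanon ((s.drop lo).take (hi - lo)) := by
  revert hab hhs
  fun_induction pvLoopB s lo hi with
  | case1 lo hi a b hfind ih =>
    intro hab hhs
    rcases pvFindPeel_spec pvPairsB s lo hi hab hhs with ⟨h1, _⟩ | ⟨a', b', h1, h2, h3, h4, h5⟩
    · rw [hfind] at h1; exact absurd h1 (by simp)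
    · rw [hfind] at h1
      injection h1 with h1
      injection h1 with ha hb
      subst ha; subst hb
      rw [ih h4 (by omega)]
      exact (pvCanon_some _ _ (by rw [show pvPairsA = pvPairsB from rfl]; exact h2)).symm
  | case2 lo hi hfind =>
    intro hab hhs
    rcases pvFindPeel_spec pvPairsB s lo hi hab hhs with ⟨_, h2⟩ | ⟨a', b', h1, _, _⟩
    · exact (pvCanon_none _ (by rw [show pvPairsA = pvPairsB from rfl]; exact h2)).symm
    · rw [hfind] at h1; exact absurd h1 (by simp)

theorem pvStrip_eq_skip (s : List Char) :
    PySem.Chars.strip s =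
      (s.drop (pvSkipL s 0 s.length)).take (pvSkipR s (pvSkipL s 0 s.length) s.length - pvSkipL s 0 s.length) := by
  have hlb := pvSkipL_bounds s 0 s.length
  have h1 := pvSkipL_spec s 0 s.length (Nat.zero_le _) (le_refl _)
  have h2 := pvSkipR_spec s (pvSkipL s 0 s.length) s.length (hlb.2 (Nat.zero_le _)) (le_refl _)
  unfold PySem.Chars.strip
  simp only [List.drop_zero, Nat.sub_zero, List.take_length] at h1
  rw [h1, h2]

-- ===== VERDICT (by name: the statement is the Claim_ definition above) =====
theorem strip_enclosing_math_fences_py_spec : Claim_equal_strip_enclosing_math_fences_py := by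
  intro text _
  unfold Spec_strip_enclosing_math_fences_py
  unfold strip_enclosing_math_fences_py strip_enclosing_math_fences_py_alt
  dsimp only
  congr 1
  have hlb := pvSkipL_bounds text.toList 0 text.toList.length
  have hrb := pvSkipR_bounds text.toList (pvSkipL text.toList 0 text.toList.length) text.toList.length
  rw [pvLoopA_eq_canon, pvStrip_eq_skip,
    pvLoopB_eq_canon text.toList _ _ (hrb.2 (hlb.2 (Nat.zero_le _))) hrb.1]
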